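-- pv_equiv track=rewrite | github.com/Cybonto/violentUTF | violentutf_api/fastapi_app/app/services/report_system/block_implementations.py | _filter_findings_by_threshold
-- ===== SOURCE A (Python) =====
-- from typing import Any, Dict, List, Optional
--
-- def _filter_findings_by_threshold(findings: List[Dict], threshold: str) -> List[Dict]:
--     """Filter findings based on severity threshold"""
--     severity_levels = {"Critical": 4, "High": 3, "Medium": 2, "Low": 1, "Informational": 0}
--
--     threshold_map = {"Critical Only": 4, "High and Above": 3, "Medium and Above": 2, "All": 0}
--
--     min_level = threshold_map.get(threshold, 3)
--
--     filtered = []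
--     for finding in findings:
--         severity = finding.get("severity", "Unknown")
--         if severity_levels.get(severity, 0) >= min_level:
--             filtered.append(finding)
--
--     # Sort by severity (highest first)
--     filtered.sort(key=lambda x: severity_levels.get(x.get("severity", "Unknown"), 0), reverse=True)
--
--     return filtered
-- ===== SOURCE B (Python) =====
-- def _filter_findings_by_threshold(findings, threshold):
--     """Filter findings based on severity threshold (bucket/counting sort, no comparison sort)"""
--     severity_levels = {"Critical": 4, "High": 3, "Medium": 2, "Low": 1, "Informational": 0}
--     min_level = {"Critical Only": 4, "High and Above": 3, "Medium and Above": 2, "All": 0}.get(threshold, 3)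
--     buckets = [[], [], [], [], []]
--     for finding in findings:
--         level = severity_levels.get(finding.get("severity", "Unknown"), 0)
--         if level >= min_level:
--             buckets[level].append(finding)
--     result = []
--     for level in range(4, -1, -1):
--         result += buckets[level]
--     return result
-- ===== Notes on version B (the rewrite author's own statement) =====
-- stated objective: alternative
-- what changed: Replaces filter-then-comparison-sort with a single-pass bucket (counting) sort over the five fixed severity levels, concatenating buckets from level 4 down to 0 to reproduce the stable descending order.
import Mathlib
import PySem

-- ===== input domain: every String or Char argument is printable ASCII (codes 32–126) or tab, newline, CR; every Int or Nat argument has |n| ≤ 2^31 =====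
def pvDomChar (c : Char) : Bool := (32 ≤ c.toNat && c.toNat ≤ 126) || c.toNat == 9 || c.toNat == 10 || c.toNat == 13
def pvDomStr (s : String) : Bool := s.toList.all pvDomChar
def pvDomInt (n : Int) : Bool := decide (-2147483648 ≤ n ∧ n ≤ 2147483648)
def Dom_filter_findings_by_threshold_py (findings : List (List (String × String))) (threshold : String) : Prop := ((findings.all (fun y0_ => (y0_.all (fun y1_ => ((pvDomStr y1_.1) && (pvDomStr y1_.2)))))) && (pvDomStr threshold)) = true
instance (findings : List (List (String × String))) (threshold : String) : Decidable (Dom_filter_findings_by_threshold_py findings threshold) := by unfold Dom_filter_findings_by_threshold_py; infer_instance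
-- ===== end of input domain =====

-- B replaces A's filter + stable comparison sort by a one-pass bucket sort over the five fixed
-- severity levels (objective: alternative algorithm, same return value).

-- ===== PORT A =====
-- severity_levels = {"Critical": 4, "High": 3, "Medium": 2, "Low": 1, "Informational": 0}
def pvSevLevels : PySem.Dict String Int :=
  PySem.Dict.mk [("Critical", 4), ("High", 3), ("Medium", 2), ("Low", 1), ("Informational", 0)]

-- threshold_map = {"Critical Only": 4, "High and Above": 3, "Medium and Above": 2, "All": 0}
def pvThresholdMap : PySem.Dict String Int :=
  PySem.Dict.mk [("Critical Only", 4), ("High and Above", 3), ("Medium and Above", 2), ("All", 0)]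

-- severity_levels.get(finding.get("severity", "Unknown"), 0)  (A's filter test and sort key; B computes the same expression)
def pvLevelOf (f : List (String × String)) : Int :=
  PySem.Dict.getD pvSevLevels (PySem.Dict.getD (PySem.Dict.mk f) "severity" "Unknown") 0

def filter_findings_by_threshold_py (findings : List (List (String × String))) (threshold : String) : List (List (String × String)) :=
  let min_level := PySem.Dict.getD pvThresholdMap threshold 3
  let filtered := findings.foldl (fun acc finding =>
    if pvLevelOf finding ≥ min_level then acc ++ [finding] else acc) []
  PySem.List.sorted filtered pvLevelOf true

-- ===== PORT B =====
-- buckets as a 5-tuple (bucket4, bucket3, bucket2, bucket1, bucket0); Python's buckets[level].append(finding)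
def pvStepB (min_level : Int)
    (acc : List (List (String × String)) × List (List (String × String)) × List (List (String × String)) × List (List (String × String)) × List (List (String × String)))
    (finding : List (String × String)) :
    List (List (String × String)) × List (List (String × String)) × List (List (String × String)) × List (List (String × String)) × List (List (String × String)) :=
  let lvl := pvLevelOf finding
  if lvl ≥ min_level then
    if lvl == 4 then (acc.1 ++ [finding], acc.2.1, acc.2.2.1, acc.2.2.2.1, acc.2.2.2.2)
    else if lvl == 3 then (acc.1, acc.2.1 ++ [finding], acc.2.2.1, acc.2.2.2.1, acc.2.2.2.2)
    else if lvl == 2 then (acc.1, acc.2.1, acc.2.2.1 ++ [finding], acc.2.2.2.1, acc.2.2.2.2)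
    else if lvl == 1 then (acc.1, acc.2.1, acc.2.2.1, acc.2.2.2.1 ++ [finding], acc.2.2.2.2)
    else (acc.1, acc.2.1, acc.2.2.1, acc.2.2.2.1, acc.2.2.2.2 ++ [finding])
  else acc

def filter_findings_by_threshold_py_alt (findings : List (List (String × String))) (threshold : String) : List (List (String × String)) :=
  let min_level := PySem.Dict.getD pvThresholdMap threshold 3
  let b := findings.foldl (pvStepB min_level) ([], [], [], [], [])
  -- result += buckets[level] for level in range(4, -1, -1)
  b.1 ++ b.2.1 ++ b.2.2.1 ++ b.2.2.2.1 ++ b.2.2.2.2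

-- ===== PRECONDITION & SPEC =====
def Spec_filter_findings_by_threshold_py (findings : List (List (String × String))) (threshold : String) (out : List (List (String × String))) : Prop := out = filter_findings_by_threshold_py_alt findings threshold
instance (findings : List (List (String × String))) (threshold : String) (out : List (List (String × String))) : Decidable (Spec_filter_findings_by_threshold_py findings threshold out) := by unfold Spec_filter_findings_by_threshold_py; infer_instance

-- ===== CLAIM (what is proved, stated in full; the proofs are below) =====
def Claim_equal_filter_findings_by_threshold_py : Prop := ∀ (findings : List (List (String × String))) (threshold : String), Dom_filter_findings_by_threshold_py findings threshold → Spec_filter_findings_by_threshold_py findings threshold (filter_findings_by_threshold_py findings threshold)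

-- ===== LEMMAS AND PROOFS =====

-- the severity level of any finding lies in {0,1,2,3,4}
lemma pvLevelOf_range (f : List (String × String)) : 0 ≤ pvLevelOf f ∧ pvLevelOf f ≤ 4 := by
  unfold pvLevelOf pvSevLevels
  rw [PySem.Dict.getD_eq_get?_getD]
  repeat rw [PySem.Dict.get?_mk_cons]
  split_ifs <;> simp [PySem.Dict.get?]

-- inserting before a prefix none of whose elements trigger `before` skips the prefix
lemma pvInsertBy_append {α : Type} (before : α → α → Bool) (x : α) (l1 l2 : List α)
    (h : ∀ y ∈ l1, before x y = false) :
    PySem.List.insertBy before x (l1 ++ l2) = l1 ++ PySem.List.insertBy before x l2 := by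
  induction l1 with
  | nil => simp
  | cons a t ih =>
    have ha : before x a = false := h a (by simp)
    cases t <;> cases l2 <;>
      simp_all [PySem.List.insertBy]

-- if every element triggers `before`, the new element goes first
lemma pvInsertBy_all_before {α : Type} (before : α → α → Bool) (x : α) (l : List α)
    (h : ∀ y ∈ l, before x y = true) :
    PySem.List.insertBy before x l = x :: l := by
  cases l with
  | nil => simp [PySem.List.insertBy]
  | cons a t => simp [PySem.List.insertBy, h a (by simp)]

-- bucket invariant for A's insertion sort: folding insertBy into concatenated level buckets
lemma pvSortBuckets (ys : List (List (String × String)))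
    (c4 c3 c2 c1 c0 : List (List (String × String)))
    (h4 : ∀ x ∈ c4, pvLevelOf x = 4) (h3 : ∀ x ∈ c3, pvLevelOf x = 3)
    (h2 : ∀ x ∈ c2, pvLevelOf x = 2) (h1 : ∀ x ∈ c1, pvLevelOf x = 1)
    (h0 : ∀ x ∈ c0, pvLevelOf x = 0) :
    ys.foldl (fun acc x => PySem.List.insertBy (fun a b => decide (pvLevelOf b < pvLevelOf a)) x acc)
      (c4 ++ c3 ++ c2 ++ c1 ++ c0) =
    (c4 ++ ys.filter (fun x => pvLevelOf x == 4)) ++ (c3 ++ ys.filter (fun x => pvLevelOf x == 3)) ++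
    (c2 ++ ys.filter (fun x => pvLevelOf x == 2)) ++ (c1 ++ ys.filter (fun x => pvLevelOf x == 1)) ++
    (c0 ++ ys.filter (fun x => pvLevelOf x == 0)) := by
  induction ys generalizing c4 c3 c2 c1 c0 with
  | nil => simp
  | cons x t ih =>
    have hr := pvLevelOf_range x
    have hk : pvLevelOf x = 0 ∨ pvLevelOf x = 1 ∨ pvLevelOf x = 2 ∨ pvLevelOf x = 3 ∨ pvLevelOf x = 4 := by omega
    simp only [List.foldl_cons]
    rcases hk with hk | hk | hk | hk | hk
    · rw [show PySem.List.insertBy (fun a b => decide (pvLevelOf b < pvLevelOf a)) x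
            (c4 ++ c3 ++ c2 ++ c1 ++ c0) = c4 ++ c3 ++ c2 ++ c1 ++ (c0 ++ [x]) from by
          rw [PySem.List.insertBy_of_forall_not_before _ _ _ (by
            intro y hy; simp at hy
            rcases hy with hy | hy | hy | hy | hy
            · have := h4 y hy; simp [hk, this]
            · have := h3 y hy; simp [hk, this]
            · have := h2 y hy; simp [hk, this]
            · have := h1 y hy; simp [hk, this]
            · have := h0 y hy; simp [hk, this])]
          simp]
      rw [ih c4 c3 c2 c1 (c0 ++ [x]) h4 h3 h2 h1 (by
        intro y hy; rcases List.mem_append.mp hy with h | h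
        · exact h0 y h
        · simp at h; subst h; exact hk)]
      simp [hk]
    · rw [show PySem.List.insertBy (fun a b => decide (pvLevelOf b < pvLevelOf a)) x
            (c4 ++ c3 ++ c2 ++ c1 ++ c0) = c4 ++ c3 ++ c2 ++ (c1 ++ [x]) ++ c0 from by
          rw [show c4 ++ c3 ++ c2 ++ c1 ++ c0 = (c4 ++ c3 ++ c2 ++ c1) ++ c0 by simp,
            pvInsertBy_append _ _ _ _ (by
              intro y hy; simp at hy
              rcases hy with hy | hy | hy | hy
              · have := h4 y hy; simp [hk, this]
              · have := h3 y hy; simp [hk, this]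
              · have := h2 y hy; simp [hk, this]
              · have := h1 y hy; simp [hk, this]),
            pvInsertBy_all_before _ _ _ (by intro y hy; have := h0 y hy; simp [hk, this])]
          simp]
      rw [ih c4 c3 c2 (c1 ++ [x]) c0 h4 h3 h2 (by
        intro y hy; rcases List.mem_append.mp hy with h | h
        · exact h1 y h
        · simp at h; subst h; exact hk) h0]
      simp [hk]
    · rw [show PySem.List.insertBy (fun a b => decide (pvLevelOf b < pvLevelOf a)) x
            (c4 ++ c3 ++ c2 ++ c1 ++ c0) = c4 ++ c3 ++ (c2 ++ [x]) ++ c1 ++ c0 from by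
          rw [show c4 ++ c3 ++ c2 ++ c1 ++ c0 = (c4 ++ c3 ++ c2) ++ (c1 ++ c0) by simp,
            pvInsertBy_append _ _ _ _ (by
              intro y hy; simp at hy
              rcases hy with hy | hy | hy
              · have := h4 y hy; simp [hk, this]
              · have := h3 y hy; simp [hk, this]
              · have := h2 y hy; simp [hk, this]),
            pvInsertBy_all_before _ _ _ (by
              intro y hy; simp at hy
              rcases hy with hy | hy
              · have := h1 y hy; simp [hk, this]
              · have := h0 y hy; simp [hk, this])]
          simp]
      rw [ih c4 c3 (c2 ++ [x]) c1 c0 h4 h3 (by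
        intro y hy; rcases List.mem_append.mp hy with h | h
        · exact h2 y h
        · simp at h; subst h; exact hk) h1 h0]
      simp [hk]
    · rw [show PySem.List.insertBy (fun a b => decide (pvLevelOf b < pvLevelOf a)) x
            (c4 ++ c3 ++ c2 ++ c1 ++ c0) = c4 ++ (c3 ++ [x]) ++ c2 ++ c1 ++ c0 from by
          rw [show c4 ++ c3 ++ c2 ++ c1 ++ c0 = (c4 ++ c3) ++ (c2 ++ c1 ++ c0) by simp,
            pvInsertBy_append _ _ _ _ (by
              intro y hy; simp at hy
              rcases hy with hy | hy
              · have := h4 y hy; simp [hk, this]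
              · have := h3 y hy; simp [hk, this]),
            pvInsertBy_all_before _ _ _ (by
              intro y hy; simp at hy
              rcases hy with hy | hy | hy
              · have := h2 y hy; simp [hk, this]
              · have := h1 y hy; simp [hk, this]
              · have := h0 y hy; simp [hk, this])]
          simp]
      rw [ih c4 (c3 ++ [x]) c2 c1 c0 h4 (by
        intro y hy; rcases List.mem_append.mp hy with h | h
        · exact h3 y h
        · simp at h; subst h; exact hk) h2 h1 h0]
      simp [hk]
    · rw [show PySem.List.insertBy (fun a b => decide (pvLevelOf b < pvLevelOf a)) x
            (c4 ++ c3 ++ c2 ++ c1 ++ c0) = (c4 ++ [x]) ++ c3 ++ c2 ++ c1 ++ c0 from by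
          rw [show c4 ++ c3 ++ c2 ++ c1 ++ c0 = c4 ++ (c3 ++ c2 ++ c1 ++ c0) by simp,
            pvInsertBy_append _ _ _ _ (by intro y hy; have := h4 y hy; simp [hk, this]),
            pvInsertBy_all_before _ _ _ (by
              intro y hy; simp at hy
              rcases hy with hy | hy | hy | hy
              · have := h3 y hy; simp [hk, this]
              · have := h2 y hy; simp [hk, this]
              · have := h1 y hy; simp [hk, this]
              · have := h0 y hy; simp [hk, this])]
          simp]
      rw [ih (c4 ++ [x]) c3 c2 c1 c0 (by
        intro y hy; rcases List.mem_append.mp hy with h | h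
        · exact h4 y h
        · simp at h; subst h; exact hk) h3 h2 h1 h0]
      simp [hk]

-- B's fold computes the per-level filtered buckets
lemma pvFoldB (m : Int) (ys : List (List (String × String)))
    (b4 b3 b2 b1 b0 : List (List (String × String))) :
    ys.foldl (pvStepB m) (b4, b3, b2, b1, b0) =
    (b4 ++ ys.filter (fun x => decide (pvLevelOf x ≥ m) && (pvLevelOf x == 4)),
     b3 ++ ys.filter (fun x => decide (pvLevelOf x ≥ m) && (pvLevelOf x == 3)),
     b2 ++ ys.filter (fun x => decide (pvLevelOf x ≥ m) && (pvLevelOf x == 2)),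
     b1 ++ ys.filter (fun x => decide (pvLevelOf x ≥ m) && (pvLevelOf x == 1)),
     b0 ++ ys.filter (fun x => decide (pvLevelOf x ≥ m) && !(pvLevelOf x == 4) && !(pvLevelOf x == 3) && !(pvLevelOf x == 2) && !(pvLevelOf x == 1))) := by
  induction ys generalizing b4 b3 b2 b1 b0 with
  | nil => simp
  | cons x t ih =>
    simp only [List.foldl_cons, pvStepB]
    split_ifs with hm h4 h3 h2 h1 <;>
      rw [ih] <;> simp_all [List.filter_cons]

-- ===== VERDICT (by name: the statement is the Claim_ definition above) =====
theorem filter_findings_by_threshold_py_spec : Claim_equal_filter_findings_by_threshold_py := by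
  intro findings threshold _
  unfold Spec_filter_findings_by_threshold_py filter_findings_by_threshold_py filter_findings_by_threshold_py_alt
  simp only [PySem.List.foldl_append_ite_eq_filter, List.nil_append,
    PySem.List.sorted_rev_eq_foldl_insertBy, pvFoldB]
  set m := PySem.Dict.getD pvThresholdMap threshold 3 with hm
  have := pvSortBuckets
    ((findings.filter (fun x => decide (pvLevelOf x ≥ m)))) [] [] [] [] []
    (by simp) (by simp) (by simp) (by simp) (by simp)
  simp only [List.nil_append, List.append_nil] at this
  rw [this]
  simp only [List.filter_filter]
  have swap : ∀ (k : Int), List.filter (fun a => pvLevelOf a == k && decide (pvLevelOf a ≥ m)) findings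
      = List.filter (fun x => decide (pvLevelOf x ≥ m) && pvLevelOf x == k) findings := by
    intro k
    exact List.filter_congr (fun x _ => Bool.and_comm _ _)
  have e0 : List.filter (fun a => pvLevelOf a == 0 && decide (pvLevelOf a ≥ m)) findings
      = List.filter (fun x => decide (pvLevelOf x ≥ m) && !(pvLevelOf x == 4) && !(pvLevelOf x == 3) && !(pvLevelOf x == 2) && !(pvLevelOf x == 1)) findings := by
    refine List.filter_congr (fun x _ => ?_)
    have hr := pvLevelOf_range x
    have hk : pvLevelOf x = 0 ∨ pvLevelOf x = 1 ∨ pvLevelOf x = 2 ∨ pvLevelOf x = 3 ∨ pvLevelOf x = 4 := by omega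
    by_cases h : pvLevelOf x ≥ m <;> rcases hk with hk | hk | hk | hk | hk <;> simp [hk]
  rw [swap 4, swap 3, swap 2, swap 1, e0]
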